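-- pv_equiv track=rewrite | github.com/paiml/depyler | examples/hard_encode_binary.py | byte_to_bits
-- ===== SOURCE A (Python) =====
-- def byte_to_bits(val: int) -> list[int]:
--     result: list[int] = []
--     i: int = 7
--     while i >= 0:
--         bit: int = (val // (1 * pow_2(i))) % 2
--         result.append(bit)
--         i = i - 1
--     return result
--
-- def pow_2(exp: int) -> int:
--     result: int = 1
--     i: int = 0
--     while i < exp:
--         result = result * 2
--         i = i + 1
--     return result
-- ===== SOURCE B (Python) =====
-- def byte_to_bits(val: int) -> list[int]:
--     bits = []
--     v = val
--     for _ in range(8):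
--         bits.append(v % 2)
--         v //= 2
--     bits.reverse()
--     return bits
-- ===== Notes on version B (the rewrite author's own statement) =====
-- stated objective: simpler
-- what changed: Replaces per-index extraction via a hand-rolled pow_2 helper (recomputing 2^i for each of the 8 positions) with a single running-remainder pass: append v % 2, halve v, eight times, then reverse; no helper and no power computation.
import Mathlib
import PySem

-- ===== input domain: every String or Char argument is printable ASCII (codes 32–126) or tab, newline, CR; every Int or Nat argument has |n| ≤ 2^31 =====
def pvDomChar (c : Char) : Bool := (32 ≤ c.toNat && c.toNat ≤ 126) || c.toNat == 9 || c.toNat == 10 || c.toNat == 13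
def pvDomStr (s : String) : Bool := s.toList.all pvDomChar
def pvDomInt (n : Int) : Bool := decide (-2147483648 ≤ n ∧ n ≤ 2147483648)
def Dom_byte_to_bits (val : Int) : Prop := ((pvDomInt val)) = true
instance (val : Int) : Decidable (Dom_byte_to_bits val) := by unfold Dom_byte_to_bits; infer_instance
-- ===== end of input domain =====

-- B replaces A's per-index pow_2 extraction with one running-remainder pass plus a final reverse (simpler).

-- ===== PORT A =====
-- pow_2: 'while i < exp: result *= 2' runs exp.toNat iterations (0 for exp ≤ 0), exactly as the Python loop
def pow_2_loop : Nat → Int → Int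
  | 0, result => result
  | n + 1, result => pow_2_loop n (result * 2)

def pow_2 (exp : Int) : Int := pow_2_loop exp.toNat 1

-- while i >= 0 with i = 7,6,…,0: fuel n+1 represents i = n
def byte_to_bits_loop (val : Int) : Nat → List Int → List Int
  | 0, result => result
  | n + 1, result =>
      byte_to_bits_loop val n
        (result ++ [PySem.Int.mod (PySem.Int.floordiv val (1 * pow_2 (n : Int))) 2])

def byte_to_bits (val : Int) : List Int := byte_to_bits_loop val 8 []

-- ===== PORT B =====
-- for _ in range(8): bits.append(v % 2); v //= 2 — then reverse
def byte_to_bits_alt_loop : Nat → Int → List Int → List Int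
  | 0, _, bits => bits
  | n + 1, v, bits => byte_to_bits_alt_loop n (PySem.Int.floordiv v 2) (bits ++ [PySem.Int.mod v 2])

def byte_to_bits_alt (val : Int) : List Int := (byte_to_bits_alt_loop 8 val []).reverse

-- ===== PRECONDITION & SPEC =====
def Spec_byte_to_bits (val : Int) (out : List Int) : Prop := out = byte_to_bits_alt val
instance (val : Int) (out : List Int) : Decidable (Spec_byte_to_bits val out) := by unfold Spec_byte_to_bits; infer_instance

-- ===== CLAIM (what is proved, stated in full; the proofs are below) =====
def Claim_equal_byte_to_bits : Prop := ∀ (val : Int), Dom_byte_to_bits val → Spec_byte_to_bits val (byte_to_bits val)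

-- ===== LEMMAS AND PROOFS =====
-- floor-division composes: (v // a) // b = v // (a*b) for positive a, b
theorem pv_fd_fd (v a b : Int) (ha : 0 < a) (hb : 0 < b) :
    PySem.Int.floordiv (PySem.Int.floordiv v a) b = PySem.Int.floordiv v (a * b) := by
  rw [PySem.Int.floordiv_eq_ediv_of_pos ha, PySem.Int.floordiv_eq_ediv_of_pos hb,
      PySem.Int.floordiv_eq_ediv_of_pos (by positivity : (0:Int) < a * b)]
  exact Int.ediv_ediv_of_nonneg (le_of_lt ha)

-- one halving step collapsed into the accumulated divisor
theorem pv_step (v a b : Int) (ha : 0 < a) (hb : a * 2 = b) :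
    PySem.Int.floordiv (PySem.Int.floordiv v a) 2 = PySem.Int.floordiv v b := by
  subst hb
  exact pv_fd_fd v a 2 ha (by norm_num)

theorem pv_p7 : pow_2 7 = 128 := by decide
theorem pv_p6 : pow_2 6 = 64 := by decide
theorem pv_p5 : pow_2 5 = 32 := by decide
theorem pv_p4 : pow_2 4 = 16 := by decide
theorem pv_p3 : pow_2 3 = 8 := by decide
theorem pv_p2 : pow_2 2 = 4 := by decide
theorem pv_p1 : pow_2 1 = 2 := by decide
theorem pv_p0 : pow_2 0 = 1 := by decide

theorem pv_fd_one (v : Int) : PySem.Int.floordiv v 1 = v := by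
  rw [PySem.Int.floordiv_eq_ediv_of_pos (by norm_num : (0:Int) < 1)]
  exact Int.ediv_one v

-- ===== VERDICT (by name: the statement is the Claim_ definition above) =====
theorem byte_to_bits_spec : Claim_equal_byte_to_bits := by
  intro val _
  show byte_to_bits val = byte_to_bits_alt val
  simp only [byte_to_bits, byte_to_bits_loop, byte_to_bits_alt, byte_to_bits_alt_loop,
    List.nil_append, List.cons_append, List.reverse_cons, List.reverse_nil,
    Nat.cast_ofNat, Nat.cast_one, Nat.cast_zero, pv_p7, pv_p6, pv_p5, pv_p4, pv_p3,
    pv_p2, pv_p1, pv_p0, one_mul, pv_fd_one]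
  rw [pv_step val 2 4 (by norm_num) (by norm_num),
      pv_step val 4 8 (by norm_num) (by norm_num),
      pv_step val 8 16 (by norm_num) (by norm_num),
      pv_step val 16 32 (by norm_num) (by norm_num),
      pv_step val 32 64 (by norm_num) (by norm_num),
      pv_step val 64 128 (by norm_num) (by norm_num)]
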